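-- pv_equiv track=rewrite | github.com/aaaaaa2493/Machine-Learning | Lab1/Lab1.py | count_indicies
-- ===== SOURCE A (Python) =====
-- def count_indicies(Y):
--
--     ret = {}
--
--     for index, one_answer in enumerate(Y):
--         one_answer = int(one_answer[0])
--
--         if one_answer in ret:
--             ret[one_answer] += [index]
--         else:
--             ret[one_answer] = [index]
--
--     return ret
-- ===== SOURCE B (Python) =====
-- def count_indicies(Y):
--     keys = [int(row[0]) for row in Y]
--     return {k: [i for i, kk in enumerate(keys) if kk == k] for k in dict.fromkeys(keys)}
-- ===== Notes on version B (the rewrite author's own statement) =====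
-- stated objective: alternative
-- what changed: Replaces the incremental scatter-into-dict pass with a declarative two-phase computation: extract the key list, ordered-dedup it with dict.fromkeys, and build each group's index list by a separate filtering pass over the enumerated keys.
import Mathlib
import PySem

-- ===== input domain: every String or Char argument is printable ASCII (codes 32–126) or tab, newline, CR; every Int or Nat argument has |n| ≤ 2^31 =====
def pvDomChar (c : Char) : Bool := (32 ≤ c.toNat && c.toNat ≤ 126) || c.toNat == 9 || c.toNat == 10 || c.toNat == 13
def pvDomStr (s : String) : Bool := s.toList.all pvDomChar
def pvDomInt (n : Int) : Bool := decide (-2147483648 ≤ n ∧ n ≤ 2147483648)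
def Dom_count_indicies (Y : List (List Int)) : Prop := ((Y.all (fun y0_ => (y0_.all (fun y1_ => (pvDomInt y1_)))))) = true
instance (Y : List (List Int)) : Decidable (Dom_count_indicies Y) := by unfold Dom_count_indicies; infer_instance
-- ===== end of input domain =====

-- B replaces A's single scatter-into-dict pass by an ordered dedup of the key list plus one
-- filtering pass per distinct key (objective: alternative decomposition, not faster).

-- ===== PORT A =====
-- A: one pass; for each (index, row), key = row[0]; append index to ret[key] (new keys create a
-- singleton). row[0] is PySem.List.pyGet? row 0; '.getD 0' totalizes the IndexError case, which
-- Pre_count_indicies excludes.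
def count_indicies (Y : List (List Int)) : List (Int × List Int) :=
  ((PySem.List.enumerate Y).foldl
    (fun ret p =>
      let one_answer := (PySem.List.pyGet? p.2 0).getD 0
      if ret.contains one_answer then
        ret.insert one_answer (ret.getD one_answer [] ++ [p.1])
      else
        ret.insert one_answer [p.1])
    PySem.Dict.empty).items

-- ===== PORT B =====
-- B: keys = [int(row[0]) for row in Y]; {k: [i for i, kk in enumerate(keys) if kk == k]
--                                        for k in dict.fromkeys(keys)}
def count_indicies_alt (Y : List (List Int)) : List (Int × List Int) :=
  let keys := Y.map (fun row => (PySem.List.pyGet? row 0).getD 0)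
  (PySem.List.dedup keys).map
    (fun k => (k, ((PySem.List.enumerate keys).filter (fun p => p.2 == k)).map (·.1)))

-- ===== PRECONDITION & SPEC =====
-- Python A raises IndexError on row[0] when some row is empty; those inputs are excluded.
def Pre_count_indicies (Y : List (List Int)) : Prop := ∀ row ∈ Y, row ≠ []
instance (Y : List (List Int)) : Decidable (Pre_count_indicies Y) := by unfold Pre_count_indicies; infer_instance
def pvWitness_count_indicies : List (List Int) := [[1, 7], [2], [1, 3]]

def Spec_count_indicies (Y : List (List Int)) (out : List (Int × List Int)) : Prop := out = count_indicies_alt Y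
instance (Y : List (List Int)) (out : List (Int × List Int)) : Decidable (Spec_count_indicies Y out) := by unfold Spec_count_indicies; infer_instance

-- ===== CLAIM (what is proved, stated in full; the proofs are below) =====
def Claim_equal_count_indicies : Prop := ∀ (Y : List (List Int)), Dom_count_indicies Y → Pre_count_indicies Y → Spec_count_indicies Y (count_indicies Y)

-- ===== LEMMAS AND PROOFS =====

-- A's loop body (membership test + insert) is exactly a Dict.modify with default [].
theorem pv_step_eq_modify (d : PySem.Dict Int (List Int)) (k i : Int) :
    (if d.contains k then d.insert k (d.getD k [] ++ [i]) else d.insert k [i])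
      = d.modify k [] (fun v => v ++ [i]) := by
  have hc := PySem.Dict.contains_eq_isSome_get? d k
  rcases hv : d.get? k with _ | v
  · rw [hv] at hc
    simp [hc, PySem.Dict.modify, PySem.Dict.getD_eq_get?_getD, hv]
  · rw [hv] at hc
    simp [hc, PySem.Dict.modify, hv, PySem.Dict.getD_eq_get?_getD]

-- enumerate commutes with mapping over the elements.
theorem pv_enumerate_map (Y : List (List Int)) (K : List Int → Int) (s : Int) :
    PySem.List.enumerate (Y.map K) s = (PySem.List.enumerate Y s).map (fun p => (p.1, K p.2)) := by
  induction Y generalizing s with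
  | nil => simp [PySem.List.enumerate_nil]
  | cons y ys ih => simp [PySem.List.enumerate_cons, ih]

theorem pv_main (Y : List (List Int)) : count_indicies Y = count_indicies_alt Y := by
  unfold count_indicies count_indicies_alt
  have hbody : (fun (ret : PySem.Dict Int (List Int)) (p : Int × List Int) =>
      let one_answer := (PySem.List.pyGet? p.2 0).getD 0
      if ret.contains one_answer then
        ret.insert one_answer (ret.getD one_answer [] ++ [p.1])
      else
        ret.insert one_answer [p.1])
      = (fun (d : PySem.Dict Int (List Int)) (p : Int × List Int) =>
          d.modify ((PySem.List.pyGet? p.2 0).getD 0) [] (fun v => v ++ [p.1])) := by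
    funext d p
    exact pv_step_eq_modify d _ p.1
  rw [hbody]
  set K : List Int → Int := fun row => (PySem.List.pyGet? row 0).getD 0 with hK
  set l := PySem.List.enumerate Y 0 with hl
  set d := l.foldl (fun d p => d.modify (K p.2) [] (fun v => v ++ [p.1])) PySem.Dict.empty with hd
  have hnd : d.keys.Nodup :=
    PySem.Dict.nodup_keys_foldl_modify_key l (fun p => K p.2) [] (fun d p v => v ++ [p.1])
      PySem.Dict.empty (by simp)
  have hkeys : d.keys = PySem.List.dedup (Y.map K) := by
    rw [hd, PySem.Dict.keys_foldl_modify_key]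
    have hms : l.map (fun p => K p.2) = Y.map K := by
      calc l.map (fun p => K p.2) = (l.map (·.2)).map K := by
            simp [List.map_map, Function.comp_def]
        _ = Y.map K := by rw [hl, PySem.List.map_snd_enumerate]
    simp [hms, PySem.Set.update_nil_left, PySem.List.dedup_eq_ofList]
  have hget : ∀ k : Int, d.getD k []
      = ((l.map (fun p => (K p.2, p.1))).filter (fun q => q.1 == k)).map (·.2) := by
    intro k
    have : d = (l.map (fun p => (K p.2, p.1))).foldl
        (fun d q => d.modify q.1 [] (fun v => v ++ [q.2])) PySem.Dict.empty := by
      rw [hd, List.foldl_map]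
    rw [this, PySem.Dict.getD_foldl_modify_append]
    simp
  rw [PySem.Dict.items_eq_map_keys d hnd [], hkeys]
  apply List.map_congr_left
  intro k hk
  refine Prod.ext rfl ?_
  rw [hget k, pv_enumerate_map Y K 0, ← hl]
  rw [List.filter_map, List.filter_map, List.map_map, List.map_map]
  simp [Function.comp_def]

-- ===== VERDICT (by name: the statement is the Claim_ definition above) =====
theorem count_indicies_spec : Claim_equal_count_indicies := by
  intro Y _ _
  unfold Spec_count_indicies
  exact pv_main Y
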